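-- pv_equiv track=rewrite | github.com/alex-anast/cs50p_2023 | 5_unit_tests/test_plates/plates.py | check_numbersInMiddle
-- ===== SOURCE A (Python) =====
-- def check_numbersInMiddle(plate: str) -> bool:
--     found_number = False
--     for element in plate:
--         if element.isdigit():
--             if found_number is False:
--                 # the first number can't be 0
--                 if element == "0":
--                     return False
--                 found_number = True
--         # if number has already been found, return Invalid if letter is found
--         if found_number and element.isalpha():
--             return False
--     return True
-- ===== SOURCE B (Python) =====
-- def check_numbersInMiddle(plate: str) -> bool:
--     # Scan right-to-left: a digit that has a letter anywhere to its right is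
--     # invalid; the last digit seen (= leftmost digit) must not be '0'.
--     seen_alpha = False
--     first_digit = None
--     for ch in reversed(plate):
--         if ch.isdigit():
--             if seen_alpha:
--                 return False
--             first_digit = ch
--         elif ch.isalpha():
--             seen_alpha = True
--     return first_digit != "0"
-- ===== Notes on version B (the rewrite author's own statement) =====
-- stated objective: alternative
-- what changed: B scans the plate right-to-left maintaining a seen-letter flag and the last digit encountered (which ends up being the leftmost digit), rejecting a digit that has a letter to its right and checking the leftmost digit against zero only after the scan, instead of A's forward scan with a found-digit flag and in-loop checks.
import Mathlib
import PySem

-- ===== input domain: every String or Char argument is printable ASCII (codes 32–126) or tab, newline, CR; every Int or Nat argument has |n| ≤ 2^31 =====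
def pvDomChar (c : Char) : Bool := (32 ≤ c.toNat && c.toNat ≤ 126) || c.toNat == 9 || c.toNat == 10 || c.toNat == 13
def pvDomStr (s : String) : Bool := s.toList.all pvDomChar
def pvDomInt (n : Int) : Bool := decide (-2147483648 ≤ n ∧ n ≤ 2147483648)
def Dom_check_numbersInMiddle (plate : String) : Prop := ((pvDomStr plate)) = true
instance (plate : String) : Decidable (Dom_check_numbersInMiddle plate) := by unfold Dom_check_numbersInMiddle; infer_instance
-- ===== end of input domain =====

-- B scans the plate RIGHT-TO-LEFT (a digit with a letter anywhere to its right is invalid;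
-- the leftmost digit, known only at the end of the reverse scan, must not be zero) instead of
-- A's forward scan with a found-digit flag (objective: alternative). Return values proved equal.

-- ===== PORT A =====
-- A's for-loop with its `found_number` flag, one character at a time
def pvLoopA : List Char → Bool → Bool
  | [], _ => true
  | c :: rest, found =>
    if PySem.Chars.isdigit c && !found then
      if c = '0' then false
      else -- found_number := true; then the `found_number and element.isalpha()` test
        if PySem.Chars.isalpha c then false else pvLoopA rest true
    else
      if found && PySem.Chars.isalpha c then false else pvLoopA rest found

def check_numbersInMiddle (plate : String) : Bool :=
  pvLoopA plate.toList false

-- ===== PORT B =====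
-- B's for-loop over reversed(plate) with state (seen_alpha, first_digit)
def pvLoopB : List Char → Bool → Option Char → Bool
  | [], _, fd => fd != some '0'              -- return first_digit != "0"
  | c :: rest, seen, fd =>
    if PySem.Chars.isdigit c then
      if seen then false else pvLoopB rest seen (some c)
    else if PySem.Chars.isalpha c then
      pvLoopB rest true fd
    else
      pvLoopB rest seen fd

def check_numbersInMiddle_alt (plate : String) : Bool :=
  pvLoopB plate.toList.reverse false none

-- ===== PRECONDITION & SPEC =====
def Spec_check_numbersInMiddle (plate : String) (out : Bool) : Prop := out = check_numbersInMiddle_alt plate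
instance (plate : String) (out : Bool) : Decidable (Spec_check_numbersInMiddle plate out) := by unfold Spec_check_numbersInMiddle; infer_instance

-- ===== CLAIM (what is proved, stated in full; the proofs are below) =====
def Claim_equal_check_numbersInMiddle : Prop := ∀ (plate : String), Dom_check_numbersInMiddle plate → Spec_check_numbersInMiddle plate (check_numbersInMiddle plate)

-- ===== LEMMAS AND PROOFS =====

-- proof-only middle ground: "some digit has a letter strictly after it"
def pvHasDBA : List Char → Bool
  | [] => false
  | c :: t => (PySem.Chars.isdigit c && t.any PySem.Chars.isalpha) || pvHasDBA t

-- a digit character is never a letter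
theorem pv_digit_not_alpha (c : Char) (h : PySem.Chars.isdigit c = true) :
    PySem.Chars.isalpha c = false := by
  simp only [PySem.Chars.isdigit, PySem.Chars.isalpha, PySem.Chars.isupper, PySem.Chars.islower,
    Bool.and_eq_true, Bool.or_eq_false_iff, Bool.and_eq_false_iff, decide_eq_true_eq,
    decide_eq_false_iff_not, Char.le_def, UInt32.le_iff_toNat_le,
    show (Char.val (Char.ofNat 48)).toNat = 48 from rfl, show (Char.val (Char.ofNat 57)).toNat = 57 from rfl,
    show (Char.val (Char.ofNat 65)).toNat = 65 from rfl, show (Char.val (Char.ofNat 90)).toNat = 90 from rfl,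
    show (Char.val (Char.ofNat 97)).toNat = 97 from rfl, show (Char.val (Char.ofNat 122)).toNat = 122 from rfl] at h ⊢
  omega

theorem pvHasDBA_alpha (l : List Char) (h : pvHasDBA l = true) :
    l.any PySem.Chars.isalpha = true := by
  induction l with
  | nil => simp [pvHasDBA] at h
  | cons c t ih =>
    simp only [pvHasDBA, Bool.or_eq_true, Bool.and_eq_true] at h
    rcases h with ⟨_, h⟩ | h
    · simp [h]
    · simp [ih h]

theorem pvHasDBA_digit (l : List Char) (h : pvHasDBA l = true) :
    l.any PySem.Chars.isdigit = true := by
  induction l with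
  | nil => simp [pvHasDBA] at h
  | cons c t ih =>
    simp only [pvHasDBA, Bool.or_eq_true, Bool.and_eq_true] at h
    rcases h with ⟨h, _⟩ | h
    · simp [h]
    · simp [ih h]

theorem pvHasDBA_snoc (xs : List Char) (x : Char) :
    pvHasDBA (xs ++ [x]) = (pvHasDBA xs || (PySem.Chars.isalpha x && xs.any PySem.Chars.isdigit)) := by
  induction xs with
  | nil => simp [pvHasDBA]
  | cons c t ih =>
    simp only [List.cons_append, pvHasDBA, ih, List.any_append, List.any_cons, List.any_nil]
    cases PySem.Chars.isdigit c <;> cases PySem.Chars.isalpha x <;>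
      cases t.any PySem.Chars.isalpha <;> cases t.any PySem.Chars.isdigit <;> simp [pvHasDBA]

-- after the first (nonzero) digit, A just rejects any letter
theorem pvLoopA_true (l : List Char) : pvLoopA l true = !(l.any PySem.Chars.isalpha) := by
  induction l with
  | nil => simp [pvLoopA]
  | cons c rest ih =>
    by_cases ha : PySem.Chars.isalpha c = true
    · simp [pvLoopA, ha]
    · simp only [Bool.not_eq_true] at ha
      simp [pvLoopA, ha, ih]

-- A computes the middle-ground spec
theorem pvLoopA_spec (l : List Char) :
    pvLoopA l false = (!(pvHasDBA l) && (l.find? PySem.Chars.isdigit != some '0')) := by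
  induction l with
  | nil => simp [pvLoopA, pvHasDBA]
  | cons c rest ih =>
    by_cases hd : PySem.Chars.isdigit c = true
    · have ha := pv_digit_not_alpha c hd
      by_cases hz : c = '0'
      · subst hz; simp [pvLoopA, hd, pvHasDBA, List.find?]
      · simp only [pvLoopA, hd, ha, Bool.not_false, Bool.and_true, if_true, if_neg hz,
          Bool.false_and, if_neg (by simp : ¬ (false = true)), pvLoopA_true]
        simp only [pvHasDBA, hd, Bool.true_and, List.find?, hd]
        cases h1 : rest.any PySem.Chars.isalpha with
        | true => simp [h1]
        | false =>
          have h2 : pvHasDBA rest = false := by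
            cases h : pvHasDBA rest
            · rfl
            · exact absurd (pvHasDBA_alpha rest h) (by simp [h1])
          simp [h1, h2, hz]
    · simp only [Bool.not_eq_true] at hd
      simp only [pvLoopA, hd, Bool.false_and, if_neg (by simp : ¬ (false = true)),
        Bool.and_false, ih, pvHasDBA, List.find?, hd]
      simp

-- B with seen_alpha already set rejects any digit, and first_digit is frozen
theorem pvLoopB_true (m : List Char) (fd : Option Char) :
    pvLoopB m true fd = (!(m.any PySem.Chars.isdigit) && (fd != some '0')) := by
  induction m generalizing fd with
  | nil => simp [pvLoopB]
  | cons c rest ih =>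
    by_cases hd : PySem.Chars.isdigit c = true
    · simp [pvLoopB, hd]
    · simp only [Bool.not_eq_true] at hd
      by_cases ha : PySem.Chars.isalpha c = true <;>
        simp [pvLoopB, hd, ha, ih]

-- B's reverse scan computes the same middle-ground spec
theorem pvLoopB_spec (l : List Char) (fd : Option Char) :
    pvLoopB l.reverse false fd =
      (!(pvHasDBA l) && (((l.find? PySem.Chars.isdigit).or fd) != some '0')) := by
  induction l using List.reverseRecOn generalizing fd with
  | nil => simp [pvLoopB, pvHasDBA]
  | append_singleton xs x ih =>
    rw [List.reverse_append]
    simp only [List.reverse_singleton, List.singleton_append]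
    by_cases hd : PySem.Chars.isdigit x = true
    · have ha := pv_digit_not_alpha x hd
      rw [pvLoopB]
      simp only [hd, if_true, if_neg (by simp : ¬ (false = true)), ih]
      rw [pvHasDBA_snoc, List.find?_append]
      simp only [ha, Bool.false_and, Bool.or_false, List.find?, hd]
      cases xs.find? PySem.Chars.isdigit <;> simp [Option.or]
    · simp only [Bool.not_eq_true] at hd
      by_cases ha : PySem.Chars.isalpha x = true
      · rw [pvLoopB]
        simp only [hd, ha, if_true, if_neg (by simp : ¬ (true = true) → False),
          Bool.false_eq_true, if_false, pvLoopB_true]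
        rw [pvHasDBA_snoc, List.find?_append]
        simp only [ha, Bool.true_and, List.any_reverse, List.find?, hd]
        cases hx : xs.any PySem.Chars.isdigit with
        | true => simp [hx]
        | false =>
          have h2 : pvHasDBA xs = false := by
            cases h : pvHasDBA xs
            · rfl
            · exact absurd (pvHasDBA_digit xs h) (by simp [hx])
          have hfind : xs.find? PySem.Chars.isdigit = none := by
            rw [List.find?_eq_none]
            intro a hma hda
            exact absurd (List.any_of_mem hma hda) (by simp [hx])
          simp [hx, h2, hfind, Option.or]
      · simp only [Bool.not_eq_true] at ha
        rw [pvLoopB]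
        simp only [hd, ha, Bool.false_eq_true, if_false, ih]
        rw [pvHasDBA_snoc, List.find?_append]
        simp [ha, List.find?, hd]

-- ===== VERDICT (by name: the statement is the Claim_ definition above) =====
theorem check_numbersInMiddle_spec : Claim_equal_check_numbersInMiddle := by
  intro plate _
  unfold Spec_check_numbersInMiddle check_numbersInMiddle check_numbersInMiddle_alt
  rw [pvLoopA_spec, pvLoopB_spec]
  cases plate.toList.find? PySem.Chars.isdigit <;> simp [Option.or]
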